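-- pv_equiv track=rewrite | github.com/mafiadarm/Project-Euler | Project Euler 050 to 100.py | No_74_Digit_factorial_chains
-- ===== SOURCE A (Python) =====
-- def No_74_Digit_factorial_chains(max_range=10 ** 6):  # 12821
--     from math import factorial
--     count = 0
--     for num in range(2, max_range):
--         num_set = {num}
--         flag = True
--
--         while flag:
--             tmp = 0
--             for i in str(num):
--                 tmp += factorial(int(i))
--
--             if tmp in num_set:
--                 if len(num_set) == 60:
--                     count += 1
--                 flag = False
--
--             num_set.add(tmp)
--             num = tmp
--
--     return count
-- ===== SOURCE B (Python) =====
-- def No_74_Digit_factorial_chains(max_range=10 ** 6):  # 12821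
--     fact = [1, 1, 2, 6, 24, 120, 720, 5040, 40320, 362880]
--
--     def nxt(n):
--         t = 0
--         while n > 0:
--             t += fact[n % 10]
--             n //= 10
--         return t
--
--     length = {}
--
--     def chain_len(n):
--         path = []
--         m = n
--         while m not in length and m not in path:
--             path.append(m)
--             m = nxt(m)
--         if m in length:
--             base = length[m]
--         else:
--             i = path.index(m)
--             base = len(path) - i
--             for v in path[i:]:
--                 length[v] = base
--             path = path[:i]
--         for v in reversed(path):
--             base += 1
--             length[v] = base
--         return base
--
--     count = 0
--     for num in range(2, max_range):
--         if chain_len(num) == 60: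
--             count += 1
--     return count
-- ===== Notes on version B (the rewrite author's own statement) =====
-- stated objective: faster
-- what changed: B memoizes the chain length of every value ever visited in a shared dict and resolves each start by walking only until a cached value or a fresh cycle is met, caching cycle members with the cycle length and tail members back-to-front, so the work per start is amortized O(1) instead of A's full chain walk with a fresh set per start; the digit-factorial successor is computed arithmetically from a table instead of str()+factorial per character.
import Mathlib
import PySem

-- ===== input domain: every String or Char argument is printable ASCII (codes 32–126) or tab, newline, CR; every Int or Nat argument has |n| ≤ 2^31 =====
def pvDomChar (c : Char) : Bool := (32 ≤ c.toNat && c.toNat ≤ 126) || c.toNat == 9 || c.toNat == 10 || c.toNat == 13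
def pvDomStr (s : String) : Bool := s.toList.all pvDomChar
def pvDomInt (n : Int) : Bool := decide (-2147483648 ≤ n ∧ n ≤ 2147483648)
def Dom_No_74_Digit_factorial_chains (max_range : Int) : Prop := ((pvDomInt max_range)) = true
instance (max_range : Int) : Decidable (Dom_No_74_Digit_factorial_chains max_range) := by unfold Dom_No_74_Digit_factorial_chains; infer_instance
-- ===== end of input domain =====

-- B memoizes chain lengths in a shared dict (cycle members get the cycle length, tail members
-- are cached back-to-front), replacing A's fresh set-walk per start; objective: faster (amortized).


-- ===== PORT A =====
-- 'tmp = 0; for i in str(num): tmp += factorial(int(i))' — int(i) is ported totally via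
-- getD 0 (every character reached is a decimal digit, so ofChars? is some there) and
-- math.factorial as Nat.factorial of the digit.
def pvDfA (num : Int) : Int :=
  (PySem.Int.toStr num).toList.foldl
    (fun tmp i => tmp + (((PySem.Int.ofChars? [i]).getD 0).toNat.factorial : Int)) 0

-- totality fuel for the while loops (never exhausted on the admitted inputs: any chain from a
-- start below 2^31 has at most 3628802 distinct values, see pvIts_le below).
def pvChainFuel : Nat := 4000000

-- A's while loop, returning the increment to count; the 'num_set.add(tmp); num = tmp' of
-- the stopping iteration has no observable effect and is omitted.
def pvLoopA : Nat → Int → PySem.Set Int → Int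
  | 0, _, _ => 0
  | fuel + 1, num, numSet =>
      let tmp := pvDfA num
      if numSet.contains tmp then (if PySem.Set.len numSet == 60 then 1 else 0)
      else pvLoopA fuel tmp (numSet.add tmp)

def No_74_Digit_factorial_chains (max_range : Int) : Int :=
  (PySem.List.pyRange 2 max_range 1).foldl
    (fun count num => count + pvLoopA pvChainFuel num (PySem.Set.ofList [num])) 0

-- ===== PORT B =====
def pvFactTable : List Int := [1, 1, 2, 6, 24, 120, 720, 5040, 40320, 362880]

-- 't = 0; while n > 0: t += fact[n % 10]; n //= 10'
def pvDfB (t n : Int) : Int :=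
  if _h : 0 < n then
    pvDfB (t + PySem.List.pyGetD pvFactTable (PySem.Int.mod n 10) 0) (PySem.Int.floordiv n 10)
  else t
termination_by n.toNat
decreasing_by
  rw [PySem.Int.floordiv_eq_ediv_of_pos (by omega)]
  omega

-- 'while m not in length and m not in path: path.append(m); m = nxt(m)'
def pvWalkMemo : Nat → PySem.Dict Int Int → List Int → Int → List Int × Int
  | 0, _, path, m => (path, m)
  | fuel + 1, memo, path, m =>
      if memo.contains m || decide (m ∈ path) then (path, m)
      else pvWalkMemo fuel memo (path ++ [m]) (pvDfB 0 m)

-- 'for v in reversed(path): base += 1; length[v] = base'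
def pvTailLoop (path : List Int) (st : Int × PySem.Dict Int Int) : Int × PySem.Dict Int Int :=
  path.reverse.foldl (fun st v => (st.1 + 1, st.2.insert v (st.1 + 1))) st

-- chain_len: returns (base, updated memo)
def pvChainLen (memo : PySem.Dict Int Int) (n : Int) : Int × PySem.Dict Int Int :=
  let pm := pvWalkMemo pvChainFuel memo [] n
  match memo.get? pm.2 with
  | some b => pvTailLoop pm.1 (b, memo)
  | none =>
      -- 'i = path.index(m)' — m is always present here, so index? is some
      let i := (PySem.List.index? pm.1 pm.2).getD 0
      let base : Int := (pm.1.length : Int) - (i : Int)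
      let memo2 := (pm.1.drop i).foldl (fun d v => d.insert v base) memo
      pvTailLoop (pm.1.take i) (base, memo2)

def No_74_Digit_factorial_chains_alt (max_range : Int) : Int :=
  ((PySem.List.pyRange 2 max_range 1).foldl
    (fun st num =>
      let td := pvChainLen st.2 num
      (if td.1 == 60 then st.1 + 1 else st.1, td.2))
    ((0 : Int), (PySem.Dict.empty : PySem.Dict Int Int))).1

-- ===== PRECONDITION & SPEC =====
def Spec_No_74_Digit_factorial_chains (max_range : Int) (out : Int) : Prop := out = No_74_Digit_factorial_chains_alt max_range
instance (max_range : Int) (out : Int) : Decidable (Spec_No_74_Digit_factorial_chains max_range out) := by unfold Spec_No_74_Digit_factorial_chains; infer_instance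

-- ===== CLAIM (what is proved, stated in full; the proofs are below) =====
def Claim_equal_No_74_Digit_factorial_chains : Prop := ∀ (max_range : Int), Dom_No_74_Digit_factorial_chains max_range → Spec_No_74_Digit_factorial_chains max_range (No_74_Digit_factorial_chains max_range)

-- ===== LEMMAS AND PROOFS =====

-- the common successor function, its iterates, and the orbit-size characterization pvG
def pvIt (j : Nat) (x : Int) : Int := (fun m => pvDfB 0 m)^[j] x
def pvIts (t : Nat) (x : Int) : List Int := (List.range t).map (pvIt · x)
def pvG (t : Nat) (x : Int) : Prop := (pvIts t x).Nodup ∧ pvIt t x ∈ pvIts t x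
def pvBnd (x : Int) : Prop := 1 ≤ x ∧ x ≤ 2147483648
def pvMemoOK (d : PySem.Dict Int Int) : Prop :=
  d.keys.Nodup ∧ ∀ k v, d.get? k = some v →
    pvBnd k ∧ d.contains (pvDfB 0 k) = true ∧ ∃ s : Nat, v = (s : Int) ∧ pvG s k

-- digit-factorial arithmetic (shared with the A-side translation pvDf_eq)
def pvPF (c : Char) : Int := (((PySem.Int.ofChars? [c]).getD 0).toNat.factorial : Int)

theorem pvDfA_natCast (m : Nat) : pvDfA (m : Int) = ((Nat.toDigits 10 m).map pvPF).sum := by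
  unfold pvDfA
  rw [PySem.Int.toList_toStr]
  have hnn : ¬ ((m : Int) < 0) := by omega
  simp only [PySem.Int.toChars, if_neg hnn, Int.toNat_natCast]
  rw [PySem.List.foldl_add, zero_add]
  rfl

theorem pvTable_eq (d : Nat) (hd : d < 10) :
    PySem.List.pyGetD pvFactTable ((d : Nat) : Int) 0 = (Nat.factorial d : Int) := by
  interval_cases d <;> decide

theorem pvPF_digitChar (d : Nat) (hd : d < 10) : pvPF (Nat.digitChar d) = (Nat.factorial d : Int) := by
  interval_cases d <;> decide

theorem pvDfB_natCast (m : Nat) (hm : 0 < m) : ∀ (t : Int),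
    pvDfB t (m : Int) = t + ((Nat.toDigits 10 m).map pvPF).sum := by
  induction m using Nat.strong_induction_on with
  | _ m IH =>
  intro t
  rw [pvDfB, dif_pos (by exact_mod_cast hm)]
  have hmod : PySem.Int.mod (m : Int) 10 = ((m % 10 : Nat) : Int) := by
    exact_mod_cast PySem.Int.mod_natCast m 10
  have hdiv : PySem.Int.floordiv (m : Int) 10 = ((m / 10 : Nat) : Int) := by
    exact_mod_cast PySem.Int.floordiv_natCast m 10
  rw [hmod, hdiv, pvTable_eq (m % 10) (Nat.mod_lt _ (by omega))]
  by_cases hsm : m < 10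
  · have h0 : m / 10 = 0 := Nat.div_eq_of_lt hsm
    rw [h0]
    rw [pvDfB, dif_neg (by norm_num)]
    rw [Nat.toDigits_of_lt_base hsm, Nat.mod_eq_of_lt hsm]
    simp [pvPF_digitChar m hsm]
  · have hq : 0 < m / 10 := Nat.div_pos (by omega) (by omega)
    conv_rhs => rw [Nat.toDigits_eq_if (by omega), if_neg hsm]
    rw [IH (m / 10) (Nat.div_lt_self hm (by omega)) hq]
    simp [pvPF_digitChar (m % 10) (Nat.mod_lt _ (by omega))]
    ring

theorem pvDf_eq (n : Int) (hn : 1 ≤ n) : pvDfA n = pvDfB 0 n := by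
  obtain ⟨m, rfl⟩ : ∃ m : Nat, n = (m : Int) := ⟨n.toNat, (Int.toNat_of_nonneg (by omega)).symm⟩
  rw [pvDfA_natCast, pvDfB_natCast m (by exact_mod_cast hn)]
  ring

theorem pvSum_pos (m : Nat) (_hm : 0 < m) : 1 ≤ ((Nat.toDigits 10 m).map pvPF).sum := by
  have hne : Nat.toDigits 10 m ≠ [] := by
    have h := @Nat.length_toDigits_pos 10 m
    intro hn; rw [hn] at h; simp at h
  obtain ⟨c, cs, hcons⟩ := List.exists_cons_of_ne_nil hne
  rw [hcons]
  have h1 : ∀ x ∈ cs.map pvPF, (0 : Int) ≤ x := by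
    intro x hx
    obtain ⟨d, _, rfl⟩ := List.mem_map.mp hx
    unfold pvPF; positivity
  have h2 : (1 : Int) ≤ pvPF c := by
    unfold pvPF
    exact_mod_cast Nat.one_le_iff_ne_zero.mpr (Nat.factorial_ne_zero _)
  have := List.sum_nonneg h1
  simp only [List.map_cons, List.sum_cons]
  omega

theorem pvDfB_pos (n : Int) (hn : 1 ≤ n) : 1 ≤ pvDfB 0 n := by
  obtain ⟨m, rfl⟩ : ∃ m : Nat, n = (m : Int) := ⟨n.toNat, (Int.toNat_of_nonneg (by omega)).symm⟩
  rw [pvDfB_natCast m (by exact_mod_cast hn)]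
  have := pvSum_pos m (by exact_mod_cast hn)
  omega

-- upper bound: n < 10^k → pvDfB t n ≤ t + 362880·k
theorem pvDfB_le (k : Nat) : ∀ (n t : Int), 0 ≤ n → n < 10 ^ k → pvDfB t n ≤ t + 362880 * k := by
  induction k with
  | zero =>
    intro n t h0 h1
    have : n = 0 := by simpa using (by omega : n = 0)
    subst this
    rw [pvDfB, dif_neg (by norm_num)]
    omega
  | succ k IH =>
    intro n t h0 h1
    by_cases hp : 0 < n
    · rw [pvDfB, dif_pos hp]
      have hfd : PySem.List.pyGetD pvFactTable (PySem.Int.mod n 10) 0 ≤ 362880 := by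
        have h1 : 0 ≤ PySem.Int.mod n 10 := PySem.Int.mod_nonneg n (by norm_num)
        have h2 : PySem.Int.mod n 10 < 10 := PySem.Int.mod_lt n (by norm_num)
        set e := PySem.Int.mod n 10 with he
        clear_value e
        interval_cases e <;> decide
      have hq0 : 0 ≤ PySem.Int.floordiv n 10 := by
        rw [PySem.Int.floordiv_eq_ediv_of_pos (by norm_num)]; omega
      have hq1 : PySem.Int.floordiv n 10 < 10 ^ k := by
        rw [PySem.Int.floordiv_eq_ediv_of_pos (by norm_num)]
        have : (10:Int) ^ (k+1) = 10 ^ k * 10 := by ring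
        omega
      have := IH (PySem.Int.floordiv n 10)
        (t + PySem.List.pyGetD pvFactTable (PySem.Int.mod n 10) 0) hq0 hq1
      push_cast
      push_cast at this
      omega
    · rw [pvDfB, dif_neg hp]
      have : (0:Int) ≤ 362880 * (k+1 : Nat) := by positivity
      omega

theorem pvBnd_next (x : Int) (hx : pvBnd x) : 1 ≤ pvDfB 0 x ∧ pvDfB 0 x ≤ 3628800 := by
  constructor
  · exact pvDfB_pos x hx.1
  · have h1x := hx.1
    have := pvDfB_le 10 x 0 (by omega)
      (by have h2 := hx.2
          have h10 : (10:Int) ^ 10 = 10000000000 := by norm_num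
          omega)
    omega

theorem pvIt_succ (j : Nat) (x : Int) : pvIt (j + 1) x = pvDfB 0 (pvIt j x) := by
  simp [pvIt, Function.iterate_succ_apply']

theorem pvIt_add (a b : Nat) (x : Int) : pvIt (a + b) x = pvIt a (pvIt b x) := by
  simp [pvIt, Function.iterate_add_apply]

theorem pvBnd_it (j : Nat) (x : Int) (hx : pvBnd x) :
    pvBnd (pvIt j x) ∧ (1 ≤ j → pvIt j x ≤ 3628800) := by
  induction j with
  | zero => exact ⟨hx, by omega⟩
  | succ j IH =>
    have h := pvBnd_next (pvIt j x) IH.1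
    rw [pvIt_succ]
    exact ⟨⟨h.1, by omega⟩, fun _ => h.2⟩

theorem pvIts_succ (t : Nat) (x : Int) : pvIts (t + 1) x = pvIts t x ++ [pvIt t x] := by
  simp [pvIts, List.range_succ]

theorem pvIts_getElem (t a : Nat) (x : Int) (h : a < t) :
    (pvIts t x)[a]'(by simp [pvIts]; omega) = pvIt a x := by
  simp [pvIts]

theorem pvIts_length (t : Nat) (x : Int) : (pvIts t x).length = t := by simp [pvIts]

-- extract index-injectivity from Nodup
theorem pvIts_inj (t : Nat) (x : Int) (h : (pvIts t x).Nodup) (a b : Nat)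
    (ha : a < t) (hb : b < t) (hab : pvIt a x = pvIt b x) : a = b := by
  have hla : a < (pvIts t x).length := by rw [pvIts_length]; exact ha
  have hlb : b < (pvIts t x).length := by rw [pvIts_length]; exact hb
  have h2 : (pvIts t x)[a]'hla = (pvIts t x)[b]'hlb := by
    rw [pvIts_getElem t a x ha, pvIts_getElem t b x hb]; exact hab
  exact h.getElem_inj_iff.mp h2

-- build Nodup from index-injectivity
theorem pvIts_nodup_of_inj (t : Nat) (x : Int)
    (h : ∀ a b, a < t → b < t → pvIt a x = pvIt b x → a = b) : (pvIts t x).Nodup := by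
  apply List.Nodup.map_on _ (List.nodup_range)
  intro a ha b hb hab
  exact h a b (List.mem_range.mp ha) (List.mem_range.mp hb) hab

theorem pvIts_add (a b : Nat) (x : Int) : pvIts (a + b) x = pvIts a x ++ pvIts b (pvIt a x) := by
  simp only [pvIts, List.range_add, List.map_append, List.map_map]
  congr 1
  apply List.map_congr_left
  intro k _
  show pvIt (a + k) x = pvIt k (pvIt a x)
  rw [Nat.add_comm, pvIt_add]

theorem pvIts_drop (t j : Nat) (x : Int) (h : j ≤ t) :
    (pvIts t x).drop j = pvIts (t - j) (pvIt j x) := by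
  have := pvIts_add j (t - j) x
  rw [show j + (t - j) = t by omega] at this
  rw [this, List.drop_append_of_le_length (by simp [pvIts_length])]
  simp [pvIts_length]

theorem pvIts_prefix (t j : Nat) (x : Int) (h : j ≤ t) :
    (pvIts t x).take j = pvIts j x := by
  have := pvIts_add j (t - j) x
  rw [show j + (t - j) = t by omega] at this
  rw [this, List.take_append_of_le_length (by simp [pvIts_length])]
  simp [pvIts_length]

theorem pvMem_its (t r : Nat) (x : Int) (h : r < t) : pvIt r x ∈ pvIts t x :=
  List.mem_map.mpr ⟨r, List.mem_range.mpr h, rfl⟩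

-- a nodup iterate list from a bounded start has at most 3628801 entries
theorem pvIts_le (t : Nat) (x : Int) (hx : pvBnd x) (h : (pvIts t x).Nodup) : t ≤ 3628801 := by
  have hcard : (pvIts t x).toFinset.card = t := by
    rw [List.toFinset_card_of_nodup h, pvIts_length]
  have hsub : (pvIts t x).toFinset ⊆ insert x (Finset.Icc (1:Int) 3628800) := by
    intro y hy
    rw [List.mem_toFinset] at hy
    obtain ⟨r, hr, rfl⟩ := List.mem_map.mp hy
    rcases Nat.eq_zero_or_pos r with h0 | h1
    · subst h0; simp [pvIt]
    · have hb := pvBnd_it r x hx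
      exact Finset.mem_insert_of_mem (Finset.mem_Icc.mpr ⟨hb.1.1, hb.2 h1⟩)
  have hle := Finset.card_le_card hsub
  have h2 : (insert x (Finset.Icc (1:Int) 3628800)).card ≤ 3628801 := by
    refine le_trans (Finset.card_insert_le _ _) ?_
    rw [Int.card_Icc]
    decide
  omega

-- uniqueness of the orbit size
theorem pvG_lt_aux (t t' : Nat) (x : Int) (h : pvG t x) (h' : pvG t' x) (hlt : t < t') : False := by
  obtain ⟨j, hj, hje⟩ : ∃ j, j < t ∧ pvIt t x = pvIt j x := by
    obtain ⟨j, hj, hje⟩ := List.mem_map.mp h.2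
    exact ⟨j, List.mem_range.mp hj, hje.symm⟩
  have := pvIts_inj t' x h'.1 t j hlt (by omega) hje
  omega

theorem pvG_unique (t t' : Nat) (x : Int) (h : pvG t x) (h' : pvG t' x) : t = t' := by
  rcases lt_trichotomy t t' with hlt | heq | hgt
  · exact absurd (pvG_lt_aux t t' x h h' hlt) (by simp)
  · exact heq
  · exact absurd (pvG_lt_aux t' t x h' h hgt) (by simp)

theorem pvG_pos (t : Nat) (x : Int) (h : pvG t x) : 1 ≤ t := by
  rcases Nat.eq_zero_or_pos t with h0 | h1
  · subst h0
    have h2 := h.2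
    simp [pvIts] at h2
  · exact h1

-- memo keys are closed under iteration
theorem pvMemo_closed (d : PySem.Dict Int Int) (hd : pvMemoOK d) (k : Int)
    (hk : d.contains k = true) (r : Nat) : d.contains (pvIt r k) = true := by
  induction r with
  | zero => simpa [pvIt]
  | succ r IH =>
    rw [pvIt_succ]
    have hs : (d.get? (pvIt r k)).isSome := by
      rw [← PySem.Dict.contains_eq_isSome_get?]; exact IH
    obtain ⟨v, hv⟩ := Option.isSome_iff_exists.mp hs
    exact (hd.2 (pvIt r k) v hv).2.1

theorem pvGet?_contains (d : PySem.Dict Int Int) (k v : Int) (h : d.get? k = some v) :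
    d.contains k = true := by
  rw [PySem.Dict.contains_eq_isSome_get?, h]; rfl

-- the inner while loop walks the iterate list until a cached value or a repeat
theorem pvWalk_spec : ∀ (fuel : Nat) (d : PySem.Dict Int Int) (j : Nat) (x : Int),
    pvBnd x → (pvIts j x).Nodup → (∀ y ∈ pvIts j x, d.get? y = none) →
    3628803 ≤ fuel + j →
    ∃ t : Nat, pvWalkMemo fuel d (pvIts j x) (pvIt j x) = (pvIts t x, pvIt t x) ∧
      (pvIts t x).Nodup ∧ (∀ y ∈ pvIts t x, d.get? y = none) ∧
      (d.contains (pvIt t x) = true ∨ pvIt t x ∈ pvIts t x) := by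
  intro fuel
  induction fuel with
  | zero =>
    intro d j x hx hnd _ hfuel
    have := pvIts_le j x hx hnd
    omega
  | succ f IH =>
    intro d j x hx hnd hfree hfuel
    rw [pvWalkMemo]
    by_cases hstop : (d.contains (pvIt j x) || decide (pvIt j x ∈ pvIts j x)) = true
    · rw [if_pos hstop]
      refine ⟨j, rfl, hnd, hfree, ?_⟩
      simp only [Bool.or_eq_true, decide_eq_true_eq] at hstop
      exact hstop
    · rw [if_neg hstop]
      simp only [Bool.or_eq_true, decide_eq_true_eq, not_or] at hstop
      obtain ⟨hc, hm⟩ := hstop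
      have hnd' : (pvIts (j + 1) x).Nodup := by
        rw [pvIts_succ]
        refine List.Nodup.append hnd (List.nodup_singleton _) ?_
        intro a ha hb
        rw [List.mem_singleton] at hb
        exact hm (hb ▸ ha)
      have hfree' : ∀ y ∈ pvIts (j + 1) x, d.get? y = none := by
        intro y hy
        rw [pvIts_succ] at hy
        rcases List.mem_append.mp hy with h | h
        · exact hfree y h
        · simp only [List.mem_singleton] at h
          subst h
          rw [PySem.Dict.get?_eq_none_iff_contains]
          exact Bool.not_eq_true _ ▸ (by simpa using hc)
      rw [show pvIts j x ++ [pvIt j x] = pvIts (j + 1) x from (pvIts_succ j x).symm,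
        ← pvIt_succ]
      exact IH d (j + 1) x hx hnd' hfree' (by omega)

-- 'for v in reversed(path)': recursion equation, result value and lookups
theorem pvTailLoop_nil (st : Int × PySem.Dict Int Int) : pvTailLoop [] st = st := rfl

theorem pvTailLoop_cons (a : Int) (P : List Int) (st : Int × PySem.Dict Int Int) :
    pvTailLoop (a :: P) st =
      ((pvTailLoop P st).1 + 1, (pvTailLoop P st).2.insert a ((pvTailLoop P st).1 + 1)) := by
  simp [pvTailLoop, List.reverse_cons, List.foldl_append]

theorem pvTailLoop_fst (P : List Int) (st : Int × PySem.Dict Int Int) :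
    (pvTailLoop P st).1 = st.1 + P.length := by
  induction P generalizing st with
  | nil => simp [pvTailLoop_nil]
  | cons a P IH =>
    rw [pvTailLoop_cons]
    simp only [IH]
    simp
    ring

theorem pvTailLoop_get?_not_mem (P : List Int) (st : Int × PySem.Dict Int Int) (k : Int)
    (hk : k ∉ P) : (pvTailLoop P st).2.get? k = st.2.get? k := by
  induction P generalizing st with
  | nil => rfl
  | cons a P IH =>
    rw [pvTailLoop_cons]
    simp only [List.mem_cons, not_or] at hk
    rw [PySem.Dict.get?_insert_of_ne _ _ hk.1, IH st hk.2]

theorem pvTailLoop_get?_mem (P : List Int) (st : Int × PySem.Dict Int Int)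
    (hnd : P.Nodup) (j : Nat) (hj : j < P.length) :
    (pvTailLoop P st).2.get? (P[j]'hj) = some (st.1 + P.length - j) := by
  induction P generalizing st j with
  | nil => simp at hj
  | cons a P IH =>
    rw [pvTailLoop_cons]
    rcases j with _ | j
    · simp only [List.getElem_cons_zero]
      rw [PySem.Dict.get?_insert_self, pvTailLoop_fst]
      simp only [List.length_cons]
      push_cast
      ring_nf
    · simp only [List.getElem_cons_succ]
      have hne : P[j]'(by simpa using hj) ≠ a := by
        intro h
        exact (List.nodup_cons.mp hnd).1 (h ▸ List.getElem_mem _)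
      rw [PySem.Dict.get?_insert_of_ne _ _ hne, IH st (List.nodup_cons.mp hnd).2 j (by simpa using hj)]
      simp only [List.length_cons]
      congr 1
      push_cast
      ring

theorem pvTailLoop_keys_nodup (P : List Int) (st : Int × PySem.Dict Int Int)
    (h : st.2.keys.Nodup) : (pvTailLoop P st).2.keys.Nodup := by
  induction P generalizing st with
  | nil => exact h
  | cons a P IH =>
    rw [pvTailLoop_cons]
    exact PySem.Dict.nodup_keys_insert _ _ _ (IH st h)

-- 'for v in path[i:]: length[v] = base'
theorem pvFoldIns_get? (l : List Int) (d : PySem.Dict Int Int) (c k : Int) :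
    (l.foldl (fun d v => d.insert v c) d).get? k = if k ∈ l then some c else d.get? k := by
  induction l generalizing d with
  | nil => simp
  | cons a l IH =>
    simp only [List.foldl_cons, IH]
    by_cases hk : k ∈ l
    · simp [hk]
    · by_cases hka : k = a
      · subst hka
        simp [hk, PySem.Dict.get?_insert_self]
      · simp [hk, hka, PySem.Dict.get?_insert_of_ne _ _ hka]

-- period of the cycle part of an orbit
theorem pvPeriod (t i : Nat) (x : Int) (hit : pvIt t x = pvIt i x) (hi : i ≤ t)
    (m : Nat) (hm : i ≤ m) : pvIt (m + (t - i)) x = pvIt m x := by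
  have h1 : m + (t - i) = (m - i) + t := by omega
  rw [h1, pvIt_add, hit, ← pvIt_add]
  congr 1
  omega

-- cycle members have orbit size = cycle length
theorem pvG_cycle (t i j : Nat) (x : Int) (hnd : (pvIts t x).Nodup)
    (hit : pvIt t x = pvIt i x) (hi : i < t) (hj1 : i ≤ j) (hj2 : j < t) :
    pvG (t - i) (pvIt j x) := by
  have hwrap : ∀ r, r < t - i →
      pvIt r (pvIt j x) = pvIt (if j + r < t then j + r else j + r - (t - i)) x := by
    intro r hr
    rw [← pvIt_add]
    by_cases hc : j + r < t
    · rw [if_pos hc]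
      congr 1
      omega
    · rw [if_neg hc]
      have hm : i ≤ j + r - (t - i) := by omega
      have hper := pvPeriod t i x hit (by omega) (j + r - (t - i)) hm
      rw [show j + r - (t - i) + (t - i) = r + j by omega] at hper
      exact hper
  constructor
  · apply pvIts_nodup_of_inj
    intro a b ha hb hab
    have h1 := hwrap a ha
    have h2 := hwrap b hb
    rw [h1, h2] at hab
    have := pvIts_inj t x hnd _ _ (by split_ifs <;> omega) (by split_ifs <;> omega) hab
    split_ifs at this <;> omega
  · have hmem : pvIt (t - i) (pvIt j x) = pvIt j x := by
      rw [← pvIt_add, show t - i + j = j + (t - i) by omega]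
      exact pvPeriod t i x hit (by omega) j hj1
    rw [hmem]
    have h0 : pvIt 0 (pvIt j x) = pvIt j x := rfl
    rw [← h0]
    exact pvMem_its (t - i) 0 (pvIt j x) (by omega)

-- tail members: dropping j of the iterate list shifts the orbit size by j
theorem pvG_drop (T j i₀ : Nat) (x : Int) (hnd : (pvIts T x).Nodup)
    (hIT : pvIt T x = pvIt i₀ x) (hji : j ≤ i₀) (hiT : i₀ < T) : pvG (T - j) (pvIt j x) := by
  constructor
  · rw [← pvIts_drop T j x (by omega)]
    exact List.Nodup.sublist (List.drop_sublist _ _) hnd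
  · have h1 : pvIt (T - j) (pvIt j x) = pvIt i₀ x := by
      rw [← pvIt_add, show T - j + j = T by omega]
      exact hIT
    have h2 : pvIt i₀ x = pvIt (i₀ - j) (pvIt j x) := by
      rw [← pvIt_add]
      congr 1
      omega
    rw [h1, h2]
    exact pvMem_its (T - j) (i₀ - j) (pvIt j x) (by omega)

theorem pvIts_mem_iff (t : Nat) (x k : Int) : k ∈ pvIts t x ↔ ∃ j, j < t ∧ pvIt j x = k := by
  constructor
  · intro h
    obtain ⟨j, hj, hje⟩ := List.mem_map.mp h
    exact ⟨j, List.mem_range.mp hj, hje⟩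
  · rintro ⟨j, hj, rfl⟩
    exact pvMem_its t j x hj

theorem pvIts_drop_mem (t₀ i : Nat) (x k : Int) (hi : i ≤ t₀) :
    k ∈ (pvIts t₀ x).drop i ↔ ∃ j, i ≤ j ∧ j < t₀ ∧ pvIt j x = k := by
  rw [pvIts_drop t₀ i x hi, pvIts_mem_iff]
  constructor
  · rintro ⟨r, hr, rfl⟩
    exact ⟨r + i, by omega, by omega, by rw [pvIt_add]⟩
  · rintro ⟨j, h1, h2, rfl⟩
    refine ⟨j - i, by omega, ?_⟩
    rw [← pvIt_add]
    congr 1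
    omega

-- memo-hit branch: the whole fresh path is cached on top of the cached suffix value
theorem pvHit_spec (d : PySem.Dict Int Int) (x : Int) (t₀ s : Nat)
    (hd : pvMemoOK d) (hx : pvBnd x)
    (hnd : (pvIts t₀ x).Nodup) (hfree : ∀ y ∈ pvIts t₀ x, d.get? y = none)
    (hb : d.get? (pvIt t₀ x) = some ((s : Int))) (hGs : pvG s (pvIt t₀ x)) :
    (pvTailLoop (pvIts t₀ x) ((s : Int), d)).1 = ((t₀ + s : Nat) : Int) ∧
    pvG (t₀ + s) x ∧ pvMemoOK (pvTailLoop (pvIts t₀ x) ((s : Int), d)).2 := by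
  have hMnotP : pvIt t₀ x ∉ pvIts t₀ x := by
    intro h
    rw [hfree _ h] at hb
    exact absurd hb (by simp)
  have hGbig : pvG (t₀ + s) x := by
    have happ : pvIts (t₀ + s) x = pvIts t₀ x ++ pvIts s (pvIt t₀ x) := pvIts_add t₀ s x
    constructor
    · rw [happ]
      refine List.Nodup.append hnd hGs.1 ?_
      intro a ha hbm
      obtain ⟨r, _, rfl⟩ := (pvIts_mem_iff s (pvIt t₀ x) a).mp hbm
      have hc : d.contains (pvIt r (pvIt t₀ x)) = true :=
        pvMemo_closed d hd (pvIt t₀ x) (pvGet?_contains d _ _ hb) r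
      rw [PySem.Dict.contains_eq_isSome_get?, hfree _ ha] at hc
      exact absurd hc (by simp)
    · rw [happ, show t₀ + s = s + t₀ from by omega, pvIt_add]
      exact List.mem_append_right _ hGs.2
  have hval : ∀ j, j < t₀ →
      (pvTailLoop (pvIts t₀ x) ((s : Int), d)).2.get? (pvIt j x) = some ((s : Int) + t₀ - j) := by
    intro j hj
    have h := pvTailLoop_get?_mem (pvIts t₀ x) ((s : Int), d) hnd j (by rw [pvIts_length]; exact hj)
    rw [pvIts_getElem t₀ j x hj] at h
    rw [h, pvIts_length]
  have hmono : ∀ y, (d.contains y = true ∨ y ∈ pvIts t₀ x) →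
      (pvTailLoop (pvIts t₀ x) ((s : Int), d)).2.contains y = true := by
    intro y hy
    by_cases hyP : y ∈ pvIts t₀ x
    · obtain ⟨j, hj, rfl⟩ := (pvIts_mem_iff t₀ x y).mp hyP
      exact pvGet?_contains _ _ _ (hval j hj)
    · rcases hy with hy | hy
      · rw [PySem.Dict.contains_eq_isSome_get?, pvTailLoop_get?_not_mem _ _ _ hyP]
        rw [PySem.Dict.contains_eq_isSome_get?] at hy
        exact hy
      · exact absurd hy hyP
  refine ⟨?_, hGbig, ?_, ?_⟩
  · rw [pvTailLoop_fst, pvIts_length]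
    push_cast
    ring
  · exact pvTailLoop_keys_nodup _ _ hd.1
  · intro k v hkv
    by_cases hkP : k ∈ pvIts t₀ x
    · obtain ⟨j, hj, rfl⟩ := (pvIts_mem_iff t₀ x k).mp hkP
      have hv : v = ((t₀ + s - j : Nat) : Int) := by
        rw [hval j hj] at hkv
        have := Option.some.inj hkv
        omega
      refine ⟨(pvBnd_it j x hx).1, ?_, ⟨t₀ + s - j, hv, ?_⟩⟩
      · rw [← pvIt_succ]
        by_cases hj1 : j + 1 < t₀
        · exact hmono _ (Or.inr (pvMem_its t₀ (j + 1) x hj1))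
        · have hj1' : j + 1 = t₀ := by omega
          rw [hj1']
          exact hmono _ (Or.inl (pvGet?_contains d _ _ hb))
      · obtain ⟨r, hr, hre⟩ := (pvIts_mem_iff s (pvIt t₀ x) (pvIt s (pvIt t₀ x))).mp hGs.2
        have hIT : pvIt (t₀ + s) x = pvIt (t₀ + r) x := by
          rw [show t₀ + s = s + t₀ from by omega, pvIt_add,
            show t₀ + r = r + t₀ from by omega, pvIt_add, hre]
        have := pvG_drop (t₀ + s) j (t₀ + r) x hGbig.1 hIT (by omega) (by omega)
        rw [show t₀ + s - j = t₀ + s - j from rfl] at this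
        exact this
    · rw [pvTailLoop_get?_not_mem _ _ _ hkP] at hkv
      obtain ⟨hbk, hck, hsk⟩ := hd.2 k v hkv
      exact ⟨hbk, hmono _ (Or.inl hck), hsk⟩

-- fresh-cycle branch: cycle members are cached with the cycle length, the tail back-to-front
theorem pvCycle_spec (d : PySem.Dict Int Int) (x : Int) (t₀ i : Nat)
    (hd : pvMemoOK d) (hx : pvBnd x)
    (hnd : (pvIts t₀ x).Nodup) (_hfree : ∀ y ∈ pvIts t₀ x, d.get? y = none)
    (hi : i < t₀) (hiM : pvIt i x = pvIt t₀ x) :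
    (pvTailLoop ((pvIts t₀ x).take i)
        ((((pvIts t₀ x).length : Int) - (i : Int)),
         ((pvIts t₀ x).drop i).foldl (fun d v => d.insert v (((pvIts t₀ x).length : Int) - (i : Int))) d)).1
      = ((t₀ : Nat) : Int) ∧
    pvG t₀ x ∧
    pvMemoOK (pvTailLoop ((pvIts t₀ x).take i)
        ((((pvIts t₀ x).length : Int) - (i : Int)),
         ((pvIts t₀ x).drop i).foldl (fun d v => d.insert v (((pvIts t₀ x).length : Int) - (i : Int))) d)).2 := by
  set base : Int := ((pvIts t₀ x).length : Int) - (i : Int) with hbase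
  set memo2 : PySem.Dict Int Int :=
    ((pvIts t₀ x).drop i).foldl (fun d v => d.insert v base) d with hmemo2
  have htake : (pvIts t₀ x).take i = pvIts i x := pvIts_prefix t₀ i x (by omega)
  have hbase' : base = (t₀ : Int) - (i : Int) := by rw [hbase, pvIts_length]
  have hGt : pvG t₀ x := ⟨hnd, by rw [← hiM]; exact pvMem_its t₀ i x hi⟩
  have hndtake : (pvIts i x).Nodup := by
    rw [← htake]
    exact List.Nodup.sublist (List.take_sublist _ _) hnd
  have hmem2 : ∀ k, memo2.get? k =
      if k ∈ (pvIts t₀ x).drop i then some base else d.get? k :=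
    fun k => pvFoldIns_get? _ d base k
  have hnotintake : ∀ j, i ≤ j → j < t₀ → pvIt j x ∉ pvIts i x := by
    intro j h1 h2 hmem
    obtain ⟨j', hj', hje⟩ := (pvIts_mem_iff i x (pvIt j x)).mp hmem
    have := pvIts_inj t₀ x hnd j' j (by omega) h2 hje
    omega
  rw [htake]
  -- tail lookups
  have hvalT : ∀ j, j < i →
      (pvTailLoop (pvIts i x) (base, memo2)).2.get? (pvIt j x) = some ((t₀ : Int) - (j : Int)) := by
    intro j hj
    have h := pvTailLoop_get?_mem (pvIts i x) (base, memo2) hndtake j (by rw [pvIts_length]; exact hj)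
    rw [pvIts_getElem i j x hj] at h
    rw [h, pvIts_length]
    rw [hbase']
    congr 1
    ring
  -- cycle lookups
  have hvalC : ∀ j, i ≤ j → j < t₀ →
      (pvTailLoop (pvIts i x) (base, memo2)).2.get? (pvIt j x) = some base := by
    intro j h1 h2
    rw [pvTailLoop_get?_not_mem _ _ _ (hnotintake j h1 h2), hmem2]
    rw [if_pos ((pvIts_drop_mem t₀ i x (pvIt j x) (by omega)).mpr ⟨j, h1, h2, rfl⟩)]
  -- untouched lookups
  have hvalO : ∀ k, k ∉ pvIts t₀ x →
      (pvTailLoop (pvIts i x) (base, memo2)).2.get? k = d.get? k := by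
    intro k hk
    have hk1 : k ∉ pvIts i x := by
      intro h
      exact hk (by rw [← pvIts_prefix t₀ i x (by omega)] at h; exact List.mem_of_mem_take h)
    have hk2 : k ∉ (pvIts t₀ x).drop i := fun h => hk (List.mem_of_mem_drop h)
    rw [pvTailLoop_get?_not_mem _ _ _ hk1, hmem2, if_neg hk2]
  have hmono : ∀ y, (d.contains y = true ∨ y ∈ pvIts t₀ x) →
      (pvTailLoop (pvIts i x) (base, memo2)).2.contains y = true := by
    intro y hy
    by_cases hyP : y ∈ pvIts t₀ x
    · obtain ⟨j, hj, rfl⟩ := (pvIts_mem_iff t₀ x y).mp hyP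
      by_cases hji : j < i
      · exact pvGet?_contains _ _ _ (hvalT j hji)
      · exact pvGet?_contains _ _ _ (hvalC j (by omega) hj)
    · rcases hy with hy | hy
      · rw [PySem.Dict.contains_eq_isSome_get?, hvalO y hyP]
        rw [PySem.Dict.contains_eq_isSome_get?] at hy
        exact hy
      · exact absurd hy hyP
  refine ⟨?_, hGt, ?_, ?_⟩
  · rw [pvTailLoop_fst, pvIts_length, hbase']
    push_cast
    ring
  · apply pvTailLoop_keys_nodup
    exact PySem.Dict.nodup_keys_foldl_insert _ (fun _ _ => base) d hd.1
  · intro k v hkv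
    by_cases hkP : k ∈ pvIts t₀ x
    · obtain ⟨j, hj, rfl⟩ := (pvIts_mem_iff t₀ x k).mp hkP
      have hclose : (pvTailLoop (pvIts i x) (base, memo2)).2.contains (pvDfB 0 (pvIt j x)) = true := by
        rw [← pvIt_succ]
        by_cases hj1 : j + 1 < t₀
        · exact hmono _ (Or.inr (pvMem_its t₀ (j + 1) x hj1))
        · have hj1' : j + 1 = t₀ := by omega
          rw [hj1', ← hiM]
          exact hmono _ (Or.inr (pvMem_its t₀ i x hi))
      by_cases hji : j < i
      · have hv : v = ((t₀ - j : Nat) : Int) := by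
          rw [hvalT j hji] at hkv
          have := Option.some.inj hkv
          omega
        exact ⟨(pvBnd_it j x hx).1, hclose,
          ⟨t₀ - j, hv, pvG_drop t₀ j i x hnd hiM.symm (by omega) hi⟩⟩
      · have hv : v = ((t₀ - i : Nat) : Int) := by
          rw [hvalC j (by omega) hj] at hkv
          have := Option.some.inj hkv
          rw [hbase'] at this
          omega
        exact ⟨(pvBnd_it j x hx).1, hclose,
          ⟨t₀ - i, hv, pvG_cycle t₀ i j x hnd hiM.symm hi (by omega) hj⟩⟩
    · rw [hvalO k hkP] at hkv
      obtain ⟨hbk, hck, hsk⟩ := hd.2 k v hkv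
      exact ⟨hbk, hmono _ (Or.inl hck), hsk⟩

-- the heart: chain_len returns the orbit size and preserves the memo invariant
theorem pvChainLen_spec (d : PySem.Dict Int Int) (x : Int) (hd : pvMemoOK d) (hx : pvBnd x) :
    ∃ (t : Nat) (d' : PySem.Dict Int Int),
      pvChainLen d x = ((t : Int), d') ∧ pvG t x ∧ pvMemoOK d' := by
  obtain ⟨t₀, heq, hnd, hfree, hstop⟩ :=
    pvWalk_spec pvChainFuel d 0 x hx (by simp [pvIts]) (by simp [pvIts]) (by norm_num [pvChainFuel])
  have heq' : pvWalkMemo pvChainFuel d [] x = (pvIts t₀ x, pvIt t₀ x) := by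
    have h0 : pvIts 0 x = ([] : List Int) := by simp [pvIts]
    have h1 : pvIt 0 x = x := rfl
    rw [← h0, ← h1]
    exact heq
  unfold pvChainLen
  rw [heq']
  dsimp only
  rcases hget : d.get? (pvIt t₀ x) with _ | b
  · -- fresh cycle: the walker stopped on a repeat inside the path
    have hmem : pvIt t₀ x ∈ pvIts t₀ x := by
      rcases hstop with hc | hm
      · rw [PySem.Dict.contains_eq_isSome_get?, hget] at hc
        exact absurd hc (by simp)
      · exact hm
    obtain ⟨idx, hidx⟩ := Option.isSome_iff_exists.mp
      ((PySem.List.index?_isSome_iff (pvIts t₀ x) (pvIt t₀ x)).mpr hmem)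
    obtain ⟨hlt, hgeteq, _⟩ := PySem.List.getElem_of_index?_eq_some hidx
    have hlt' : idx < t₀ := by rwa [pvIts_length] at hlt
    have hiM : pvIt idx x = pvIt t₀ x := by
      rw [← pvIts_getElem t₀ idx x hlt']
      exact hgeteq
    have hc := pvCycle_spec d x t₀ idx hd hx hnd hfree hlt' hiM
    refine ⟨t₀, _, ?_, hc.2.1, hc.2.2⟩
    simp only [hidx, Option.getD_some]
    rw [Prod.ext_iff]
    exact ⟨hc.1, rfl⟩
  · -- memo hit
    obtain ⟨_, _, s, hbs, hGs⟩ := hd.2 _ b hget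
    subst hbs
    have hh := pvHit_spec d x t₀ s hd hx hnd hfree hget hGs
    refine ⟨t₀ + s, _, ?_, hh.2.1, hh.2.2⟩
    rw [Prod.ext_iff]
    exact ⟨hh.1, rfl⟩

-- A's while loop returns 1 exactly on orbit size 60
theorem pvLoopA_spec : ∀ (fuel : Nat) (j t : Nat) (x : Int), pvBnd x → pvG t x → j < t →
    t ≤ fuel + j →
    pvLoopA fuel (pvIt j x) (pvIts (j + 1) x) = (if (t : Int) == 60 then 1 else 0) := by
  intro fuel
  induction fuel with
  | zero => intro j t x _ _ hjt hft; omega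
  | succ f IH =>
    intro j t x hx hG hjt hft
    have hpos : 1 ≤ pvIt j x := (pvBnd_it j x hx).1.1
    have htmp : pvDfA (pvIt j x) = pvIt (j + 1) x := by
      rw [pvDf_eq _ hpos, ← pvIt_succ]
    simp only [pvLoopA, htmp]
    by_cases hstep : j + 1 = t
    · rw [hstep]
      have hcont : PySem.Set.contains (pvIts t x) (pvIt t x) = true := by
        simpa [PySem.Set.contains] using hG.2
      rw [if_pos hcont]
      simp only [PySem.Set.len, pvIts_length]
    · have hmem : pvIt (j + 1) x ∉ pvIts (j + 1) x := by
        intro hmem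
        have hndp1 : (pvIts (j + 1) x).Nodup := by
          rw [← pvIts_prefix t (j + 1) x (by omega)]
          exact List.Nodup.sublist (List.take_sublist _ _) hG.1
        exact hstep (pvG_unique (j + 1) t x ⟨hndp1, hmem⟩ hG)
      have hcont : PySem.Set.contains (pvIts (j + 1) x) (pvIt (j + 1) x) = false := by
        simpa [PySem.Set.contains] using hmem
      rw [if_neg (by rw [hcont]; simp)]
      have hadd : PySem.Set.add (pvIts (j + 1) x) (pvIt (j + 1) x) = pvIts (j + 1 + 1) x := by
        unfold PySem.Set.add
        rw [hcont]
        simp only [Bool.false_eq_true, if_false]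
        exact (pvIts_succ _ x).symm
      rw [hadd]
      exact IH (j + 1) t x hx hG (by omega) (by omega)

-- per-start agreement
theorem pvStep (d : PySem.Dict Int Int) (x : Int) (hd : pvMemoOK d) (hx : pvBnd x) :
    pvMemoOK (pvChainLen d x).2 ∧
    pvLoopA pvChainFuel x (PySem.Set.ofList [x]) =
      (if (pvChainLen d x).1 == 60 then 1 else 0) := by
  obtain ⟨t, d', heq, hG, hok⟩ := pvChainLen_spec d x hd hx
  rw [heq]
  refine ⟨hok, ?_⟩
  have ht : t ≤ 3628801 := pvIts_le t x hx hG.1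
  have h1 : pvIt 0 x = x := rfl
  have h2 : pvIts 1 x = PySem.Set.ofList [x] := by
    simp [pvIts, PySem.Set.ofList, PySem.Set.add, PySem.Set.empty, pvIt]
  have := pvLoopA_spec pvChainFuel 0 t x hx hG (pvG_pos t x hG) (by norm_num [pvChainFuel]; omega)
  rw [h1, h2] at this
  exact this

theorem pvMemoOK_empty : pvMemoOK PySem.Dict.empty := by
  constructor
  · simp [PySem.Dict.keys_empty]
  · intro k v h
    rw [PySem.Dict.get?_empty] at h
    exact absurd h (by simp)

-- the outer loops agree element by element
theorem pvFold_eq : ∀ (l : List Int) (c : Int) (d : PySem.Dict Int Int),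
    (∀ x ∈ l, pvBnd x) → pvMemoOK d →
    (l.foldl (fun st num =>
        let td := pvChainLen st.2 num
        (if td.1 == 60 then st.1 + 1 else st.1, td.2)) (c, d)).1 =
      l.foldl (fun count num => count + pvLoopA pvChainFuel num (PySem.Set.ofList [num])) c := by
  intro l
  induction l with
  | nil => intro c d _ _; rfl
  | cons a l IH =>
    intro c d hb hd
    obtain ⟨hok, hstep⟩ := pvStep d a hd (hb a (List.mem_cons_self))
    simp only [List.foldl_cons]
    rw [IH _ _ (fun x hx => hb x (List.mem_cons_of_mem a hx)) hok]
    congr 1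
    rw [hstep]
    split_ifs <;> ring

-- ===== VERDICT (by name: the statement is the Claim_ definition above) =====
theorem No_74_Digit_factorial_chains_spec : Claim_equal_No_74_Digit_factorial_chains := by
  intro max_range hdom
  unfold Spec_No_74_Digit_factorial_chains
  unfold No_74_Digit_factorial_chains No_74_Digit_factorial_chains_alt
  have hmr : max_range ≤ 2147483648 := by
    simp only [Dom_No_74_Digit_factorial_chains, pvDomInt, decide_eq_true_eq] at hdom
    exact hdom.2
  rw [pvFold_eq (PySem.List.pyRange 2 max_range 1) 0 PySem.Dict.empty
    (fun x hx => by
      have h := PySem.List.mem_pyRange_one.mp hx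
      exact ⟨by omega, by omega⟩)
    pvMemoOK_empty]
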